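-- pv_equiv track=rewrite | github.com/aquastripe/problem-solving | codeforces/1996 Div3/D.py | solve
-- ===== SOURCE A (Python) =====
-- def check(a, b, c, n, x):
--     return a * b + b * c + a * c <= n and a + b + c <= x
--
-- def solve(n, x):
--     ans = 0
--     max_a = min((n - 1) // 2 + 1, x - 2)
--     for a in range(1, max_a + 1):
--         b = 1
--         while check(a, b, 1, n, x):
--             c = min((n - a * b) // (a + b), x - a - b)
--             ans += c
--             b += 1
--
--     return ans
-- ===== SOURCE B (Python) =====
-- def solve(n, x):
--     # Plain brute force: enumerate every triple (a, b, c) directly, counting one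
--     # per valid triple; each loop stops at the first value whose guard fails.
--     ans = 0
--     a = 1
--     while 2 * a + 1 <= n and a + 2 <= x:
--         b = 1
--         while a * b + b + a <= n and a + b + 1 <= x:
--             c = 1
--             while a * b + b * c + a * c <= n and a + b + c <= x:
--                 ans += 1
--                 c += 1
--             b += 1
--         a += 1
--     return ans
-- ===== Notes on version B (the rewrite author's own statement) =====
-- stated objective: alternative
-- what changed: Replaces A's closed-form count of valid c per (a,b) pair (min of a floor division and x-a-b) and its precomputed max_a range by a direct triple-nested brute-force enumeration that increments the answer once per valid triple (a,b,c).
import Mathlib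
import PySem

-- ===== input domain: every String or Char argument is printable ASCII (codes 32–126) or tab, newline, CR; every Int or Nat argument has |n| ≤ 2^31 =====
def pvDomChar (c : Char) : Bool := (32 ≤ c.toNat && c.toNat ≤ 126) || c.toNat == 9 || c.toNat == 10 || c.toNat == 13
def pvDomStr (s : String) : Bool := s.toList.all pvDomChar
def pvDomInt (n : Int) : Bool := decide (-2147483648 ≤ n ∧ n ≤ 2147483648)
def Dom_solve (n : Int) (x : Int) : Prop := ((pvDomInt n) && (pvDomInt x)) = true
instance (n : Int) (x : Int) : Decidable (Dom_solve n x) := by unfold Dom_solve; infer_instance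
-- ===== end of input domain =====

-- B replaces A's per-(a,b) closed-form count of c by a direct triple-nested
-- brute-force enumeration, one increment per valid triple; objective: alternative.

-- ===== PORT A =====
-- helper `check` of A
def check (a b c n x : Int) : Bool := decide (a * b + b * c + a * c ≤ n) && decide (a + b + c ≤ x)

-- A's inner `while check(a, b, 1, n, x)` loop
def solveWhileB (n x a b ans : Int) : Int :=
  if check a b 1 n x then
    solveWhileB n x a (b + 1)
      (ans + min (PySem.Int.floordiv (n - a * b) (a + b)) (x - a - b))
  else ans
termination_by (x - a - b).toNat
decreasing_by
  simp only [check, Bool.and_eq_true, decide_eq_true_eq] at *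
  omega

def solve (n : Int) (x : Int) : Int :=
  let max_a := min (PySem.Int.floordiv (n - 1) 2 + 1) (x - 2)
  (PySem.List.pyRange 1 (max_a + 1) 1).foldl (fun ans a => solveWhileB n x a 1 ans) 0

-- ===== PORT B =====
-- B's innermost `while a*b + b*c + a*c <= n and a + b + c <= x` loop over c
def cLoop (n x a b c ans : Int) : Int :=
  if decide (a * b + b * c + a * c ≤ n) && decide (a + b + c ≤ x) then
    cLoop n x a b (c + 1) (ans + 1)
  else ans
termination_by (x - a - b - c + 1).toNat
decreasing_by
  simp only [Bool.and_eq_true, decide_eq_true_eq] at *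
  omega

-- B's middle `while a*b + b + a <= n and a + b + 1 <= x` loop over b
def bLoop (n x a b ans : Int) : Int :=
  if decide (a * b + b + a ≤ n) && decide (a + b + 1 ≤ x) then
    bLoop n x a (b + 1) (cLoop n x a b 1 ans)
  else ans
termination_by (x - a - b).toNat
decreasing_by
  simp only [Bool.and_eq_true, decide_eq_true_eq] at *
  omega

-- B's outer `while 2*a + 1 <= n and a + 2 <= x` loop over a
def aLoop (n x a ans : Int) : Int :=
  if decide (2 * a + 1 ≤ n) && decide (a + 2 ≤ x) then
    aLoop n x (a + 1) (bLoop n x a 1 ans)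
  else ans
termination_by (x - a).toNat
decreasing_by
  simp only [Bool.and_eq_true, decide_eq_true_eq] at *
  omega

def solve_alt (n : Int) (x : Int) : Int := aLoop n x 1 0

-- ===== PRECONDITION & SPEC =====
def Spec_solve (n : Int) (x : Int) (out : Int) : Prop := out = solve_alt n x
instance (n : Int) (x : Int) (out : Int) : Decidable (Spec_solve n x out) := by unfold Spec_solve; infer_instance

-- ===== CLAIM (what is proved, stated in full; the proofs are below) =====
def Claim_equal_solve : Prop := ∀ (n : Int) (x : Int), Dom_solve n x → Spec_solve n x (solve n x)

-- ===== LEMMAS AND PROOFS =====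

-- the count both programs produce for a pair (u, v) (clamped at 0)
def gTerm (n x u v : Int) : Int :=
  max 0 (min (PySem.Int.floordiv (n - u * v) (u + v)) (x - u - v))

-- the cutoff of the third variable is exactly the min formula
theorem cond_iff (n x u v w : Int) (hu : 1 ≤ u) (hv : 1 ≤ v) :
    (u * v + v * w + u * w ≤ n ∧ u + v + w ≤ x) ↔
      w ≤ min (PySem.Int.floordiv (n - u * v) (u + v)) (x - u - v) := by
  have hpos : (0 : Int) < u + v := by omega
  rw [le_min_iff, PySem.Int.le_floordiv_iff_mul_le hpos]
  constructor
  · rintro ⟨h1, h2⟩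
    exact ⟨by nlinarith, by omega⟩
  · rintro ⟨h1, h2⟩
    exact ⟨by nlinarith, by omega⟩

-- when no third value fits, the pair contributes nothing
theorem gTerm_zero (n x u v : Int) (hu : 1 ≤ u) (hv : 1 ≤ v)
    (h : ¬ (u * v + u + v ≤ n ∧ u + v + 1 ≤ x)) : gTerm n x u v = 0 := by
  have hiff := cond_iff n x u v 1 hu hv
  have hm : ¬ (1 : Int) ≤ min (PySem.Int.floordiv (n - u * v) (u + v)) (x - u - v) := by
    intro hmin
    obtain ⟨h1, h2⟩ := hiff.mpr hmin
    exact h ⟨by nlinarith, by omega⟩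
  unfold gTerm
  omega

-- the pair guard is antitone in the second variable
theorem guard_mono (n x u v v' : Int) (hu : 1 ≤ u) (hvv : v ≤ v')
    (h : ¬ (u * v + u + v ≤ n ∧ u + v + 1 ≤ x)) :
    ¬ (u * v' + u + v' ≤ n ∧ u + v' + 1 ≤ x) := by
  rintro ⟨h1, h2⟩
  exact h ⟨by nlinarith, by omega⟩

-- B's c-loop counts exactly the clamped tail from c up to the cutoff
theorem cLoop_count (n x a b : Int) (ha : 1 ≤ a) (hb : 1 ≤ b) (c ans : Int) :
    cLoop n x a b c ans
      = ans + max 0 (min (PySem.Int.floordiv (n - a * b) (a + b)) (x - a - b) - c + 1) := by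
  rw [cLoop]
  -- (proof continues)
  have hiff := cond_iff n x a b c ha hb
  by_cases h : a * b + b * c + a * c ≤ n ∧ a + b + c ≤ x
  · have hc : c ≤ min (PySem.Int.floordiv (n - a * b) (a + b)) (x - a - b) := hiff.mp h
    rw [if_pos (by simp [h.1, h.2]), cLoop_count n x a b ha hb (c + 1) (ans + 1)]
    omega
  · have hc : ¬ c ≤ min (PySem.Int.floordiv (n - a * b) (a + b)) (x - a - b) :=
      fun hle => h (hiff.mpr hle)
    rw [if_neg (by simpa using h)]
    omega
termination_by (x - a - b - c + 1).toNat
decreasing_by omega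

-- A's b-loop sums gTerm over the tail interval [b, x-2]
theorem solveWhileB_sum (n x a : Int) (ha : 1 ≤ a) (b ans : Int) (hb : 1 ≤ b) :
    solveWhileB n x a b ans = ans + ∑ t ∈ Finset.Icc b (x - 2), gTerm n x a t := by
  rw [solveWhileB]
  by_cases h : a * b + a + b ≤ n ∧ a + b + 1 ≤ x
  · have hchk : check a b 1 n x = true := by
      simp only [check, Bool.and_eq_true, decide_eq_true_eq]
      exact ⟨by nlinarith [h.1], by omega⟩
    rw [if_pos hchk]
    have h1 : (1 : Int) ≤ min (PySem.Int.floordiv (n - a * b) (a + b)) (x - a - b) :=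
      (cond_iff n x a b 1 ha hb).mp ⟨by nlinarith [h.1], by omega⟩
    have hbK : b ≤ x - 2 := by omega
    rw [solveWhileB_sum n x a ha (b + 1) _ (by omega)]
    rw [← Finset.insert_Icc_add_one_left_eq_Icc hbK, Finset.sum_insert (by simp)]
    have hg : gTerm n x a b = min (PySem.Int.floordiv (n - a * b) (a + b)) (x - a - b) := by
      unfold gTerm; omega
    rw [hg]
    ring
  · have hchk : check a b 1 n x = false := by
      simp only [check, Bool.and_eq_false_iff, decide_eq_false_iff_not]
      by_cases h1 : a * b + b * 1 + a * 1 ≤ n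
      · exact Or.inr fun h2 => h ⟨by nlinarith, by omega⟩
      · exact Or.inl h1
    rw [if_neg (by simp [hchk])]
    have hz : ∑ t ∈ Finset.Icc b (x - 2), gTerm n x a t = 0 := by
      apply Finset.sum_eq_zero
      intro t ht
      simp only [Finset.mem_Icc] at ht
      exact gTerm_zero n x a t ha (by omega) (guard_mono n x a b t ha ht.1 h)
    omega
termination_by (x - a - b).toNat
decreasing_by omega

-- B's b-loop sums gTerm over the same tail interval
theorem bLoop_sum (n x a : Int) (ha : 1 ≤ a) (b ans : Int) (hb : 1 ≤ b) :
    bLoop n x a b ans = ans + ∑ t ∈ Finset.Icc b (x - 2), gTerm n x a t := by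
  rw [bLoop]
  by_cases h : a * b + b + a ≤ n ∧ a + b + 1 ≤ x
  · rw [if_pos (by simp [h.1, h.2])]
    have h1 : (1 : Int) ≤ min (PySem.Int.floordiv (n - a * b) (a + b)) (x - a - b) :=
      (cond_iff n x a b 1 ha hb).mp ⟨by nlinarith [h.1], by omega⟩
    have hbK : b ≤ x - 2 := by omega
    rw [bLoop_sum n x a ha (b + 1) _ (by omega), cLoop_count n x a b ha hb 1 ans]
    rw [← Finset.insert_Icc_add_one_left_eq_Icc hbK, Finset.sum_insert (by simp)]
    have hg : gTerm n x a b = min (PySem.Int.floordiv (n - a * b) (a + b)) (x - a - b) := by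
      unfold gTerm; omega
    rw [hg]
    omega
  · rw [if_neg (by simpa using h)]
    have hz : ∑ t ∈ Finset.Icc b (x - 2), gTerm n x a t = 0 := by
      apply Finset.sum_eq_zero
      intro t ht
      simp only [Finset.mem_Icc] at ht
      apply gTerm_zero n x a t ha (by omega)
      apply guard_mono n x a b t ha ht.1
      rintro ⟨h1, h2⟩
      exact h ⟨by omega, h2⟩
    omega
termination_by (x - a - b).toNat
decreasing_by omega

-- a whole row vanishes once the outer guard fails
theorem row_zero (n x u : Int) (hu : 1 ≤ u) (h : ¬ (2 * u + 1 ≤ n ∧ u + 2 ≤ x)) :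
    ∑ t ∈ Finset.Icc 1 (x - 2), gTerm n x u t = 0 := by
  apply Finset.sum_eq_zero
  intro t ht
  simp only [Finset.mem_Icc] at ht
  have h1 : ¬ (u * 1 + u + 1 ≤ n ∧ u + 1 + 1 ≤ x) := by
    rintro ⟨h1, h2⟩
    exact h ⟨by nlinarith, by omega⟩
  exact gTerm_zero n x u t hu (by omega) (guard_mono n x u 1 t hu ht.1 h1)

-- B's a-loop sums the rows over [a, x-2]
theorem aLoop_sum (n x : Int) (a ans : Int) (ha : 1 ≤ a) :
    aLoop n x a ans
      = ans + ∑ u ∈ Finset.Icc a (x - 2), ∑ t ∈ Finset.Icc 1 (x - 2), gTerm n x u t := by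
  rw [aLoop]
  by_cases h : 2 * a + 1 ≤ n ∧ a + 2 ≤ x
  · rw [if_pos (by simp [h.1, h.2])]
    have haK : a ≤ x - 2 := by omega
    rw [aLoop_sum n x (a + 1) _ (by omega), bLoop_sum n x a ha 1 ans le_rfl]
    rw [← Finset.insert_Icc_add_one_left_eq_Icc haK, Finset.sum_insert (by simp)]
    ring
  · rw [if_neg (by simpa using h)]
    have hz : ∀ u ∈ Finset.Icc a (x - 2), ∑ t ∈ Finset.Icc 1 (x - 2), gTerm n x u t = 0 := by
      intro u hu
      simp only [Finset.mem_Icc] at hu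
      apply row_zero n x u (by omega)
      rintro ⟨h1, h2⟩
      exact h ⟨by omega, by omega⟩
    rw [Finset.sum_eq_zero hz]
    ring
termination_by (x - a).toNat
decreasing_by omega

-- A's for-loop over range(1, max_a+1) sums the rows over [lo, x-2]
theorem solveFold_sum (n x lo ans : Int) (hlo : 1 ≤ lo) :
    (PySem.List.pyRange lo (min (PySem.Int.floordiv (n - 1) 2 + 1) (x - 2) + 1) 1).foldl
        (fun ans a => solveWhileB n x a 1 ans) ans
      = ans + ∑ u ∈ Finset.Icc lo (x - 2), ∑ t ∈ Finset.Icc 1 (x - 2), gTerm n x u t := by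
  set M := min (PySem.Int.floordiv (n - 1) 2 + 1) (x - 2) with hM
  have hMx : M ≤ x - 2 := by omega
  by_cases hle : M + 1 ≤ lo
  · rw [PySem.List.pyRange_one_eq_nil hle, List.foldl_nil]
    have hz : ∀ u ∈ Finset.Icc lo (x - 2), ∑ t ∈ Finset.Icc 1 (x - 2), gTerm n x u t = 0 := by
      intro u hu
      simp only [Finset.mem_Icc] at hu
      apply row_zero n x u (by omega)
      rintro ⟨h1, h2⟩
      have : u ≤ PySem.Int.floordiv (n - 1) 2 := by
        rw [PySem.Int.le_floordiv_iff_mul_le (by norm_num)]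
        omega
      omega
    rw [Finset.sum_eq_zero hz]
    ring
  · rw [PySem.List.pyRange_one_cons (by omega), List.foldl_cons]
    rw [solveFold_sum n x (lo + 1) _ (by omega)]
    rw [solveWhileB_sum n x lo hlo 1 ans le_rfl]
    have hloK : lo ≤ x - 2 := by omega
    rw [← Finset.insert_Icc_add_one_left_eq_Icc hloK, Finset.sum_insert (by simp)]
    ring
termination_by (min (PySem.Int.floordiv (n - 1) 2 + 1) (x - 2) + 1 - lo).toNat
decreasing_by omega

-- ===== VERDICT (by name: the statement is the Claim_ definition above) =====
theorem solve_spec : Claim_equal_solve := by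
  intro n x _
  unfold Spec_solve solve solve_alt
  rw [solveFold_sum n x 1 0 le_rfl, aLoop_sum n x 1 0 le_rfl]
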